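-- pv_equiv track=rewrite | github.com/eXzacT/neetcode-practice | codec.py | decode
-- ===== SOURCE A (Python) =====
-- def decode(encoded_string: str) -> list[str]:
--     """ Decoding the encoded string back to original (31/10/2023)
--         This is done by going through the string and finding out how long the encoded word is,
--         then just adding the slice of the same length into a new array of words
--     """
--
--     decoded_string = []
--     i = previous_word_end = 0
--
--     while i < len(encoded_string):
--         if encoded_string[i] == '#':
--
--             # The slice from previous word ending to '#' sign is representing length of the next string (31/10/2023)
--             string_length = int(encoded_string[previous_word_end:i])
--             i += 1  # Skip the '#' sign (31/10/2023)
--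
--             # Add the string to the array of strings, skip the entire string and remember its end position (31/10/2023)
--             decoded_string.append(encoded_string[i:i+string_length])
--             i += string_length
--             previous_word_end = i
--
--         i += 1
--
--     return decoded_string
-- ===== SOURCE B (Python) =====
-- def decode(encoded_string: str) -> list[str]:
--     words = []
--     rest = encoded_string
--     while True:
--         j = rest.find('#')
--         if j == -1:
--             return words
--         length = int(rest[:j])
--         words.append(rest[j + 1:j + 1 + length])
--         rest = rest[j + 1 + length:]
--     return words
-- ===== Notes on version B (the rewrite author's own statement) =====
-- stated objective: simpler
-- what changed: B consumes the string word by word -- find the next '#' with str.find, parse the length prefix, slice the word out and cut the processed prefix off -- instead of A's flat per-character index loop with the extra previous_word_end state variable; the per-character Python-level loop is replaced by C-level find/slice jumps.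
-- outside the precondition, e.g. on decode('0##x'): A returns [''], B raises ValueError; on decode('2#ab-1#'): A returns ['ab', ''], B raises ValueError
import Mathlib
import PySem

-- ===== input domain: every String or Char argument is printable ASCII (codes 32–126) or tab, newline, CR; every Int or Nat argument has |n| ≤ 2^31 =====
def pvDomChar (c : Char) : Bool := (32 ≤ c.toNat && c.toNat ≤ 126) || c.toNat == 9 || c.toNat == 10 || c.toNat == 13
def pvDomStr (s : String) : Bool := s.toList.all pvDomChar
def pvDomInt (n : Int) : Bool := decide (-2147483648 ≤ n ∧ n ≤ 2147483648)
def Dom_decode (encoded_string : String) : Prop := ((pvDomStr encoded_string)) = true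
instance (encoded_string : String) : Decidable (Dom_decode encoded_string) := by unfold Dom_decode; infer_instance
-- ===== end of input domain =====

-- B consumes the encoded string word-by-word (find '#', parse length, slice word, drop prefix)
-- instead of A's per-character scan with a previous_word_end variable; objective: simpler
-- (a timing run also measured B faster: C-level str.find/slicing vs a per-char Python loop).


-- ===== PORT A =====
-- A's while-loop: fuel (length+1) is enough for every run the claim covers (inside Pre_ the
-- index i strictly increases each iteration); on fuel exhaustion / IndexError / ValueError
-- (all outside Pre_) the current accumulator is returned.
def decodeLoop (s : List Char) : Nat → Int → Int → List String → List String
  | 0, _, _, acc => acc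
  | fuel + 1, i, prev, acc =>
    if i < (s.length : Int) then
      match PySem.List.pyGet? s i with
      | none => acc                      -- IndexError (unreachable: |i| ≤ len here)
      | some c =>
        if c = '#' then
          match PySem.Int.ofChars? (PySem.List.slice s (some prev) (some i)) with
          | none => acc                  -- ValueError (outside Pre_)
          | some n =>
            decodeLoop s fuel (i + 1 + n + 1) (i + 1 + n)
              (acc ++ [String.ofList (PySem.List.slice s (some (i + 1)) (some (i + 1 + n)))])
        else decodeLoop s fuel (i + 1) prev acc
    else acc

def decode (encoded_string : String) : List String :=
  decodeLoop encoded_string.toList (encoded_string.toList.length + 1) 0 0 []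

-- ===== PORT B =====
-- B's while-loop over the remaining suffix; same fuel convention as A's port.
def decodeAltLoop : Nat → List Char → List String → List String
  | 0, _, acc => acc
  | fuel + 1, rest, acc =>
    let j := PySem.Chars.find rest ['#']
    if j = -1 then acc
    else
      match PySem.Int.ofChars? (PySem.List.slice rest none (some j)) with
      | none => acc                      -- ValueError (outside Pre_)
      | some n =>
        decodeAltLoop fuel (PySem.List.slice rest (some (j + 1 + n)) none)
          (acc ++ [String.ofList (PySem.List.slice rest (some (j + 1)) (some (j + 1 + n)))])

def decode_alt (encoded_string : String) : List String :=
  decodeAltLoop (encoded_string.toList.length + 1) encoded_string.toList []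

-- ===== PRECONDITION & SPEC =====
-- Pre_ admits exactly the well-formed encodings: blocks "<nonneg Python int>#<word of that
-- length>" followed by a '#'-free tail (each block consumes ≥ 1 char, so length+1 steps of the
-- grammar check always suffice — the counter is a recursion bound of the GRAMMAR, it simulates
-- neither port).  It excludes malformed encodings, where the two programs differ by accident:
-- a length field that is not a nonnegative int makes A raise ValueError or diverge — except
-- when A's extra `i += 1` skips a '#' sitting right at a word boundary, where A returns but B
-- raises ValueError.
def preAuxF : Nat → List Char → Bool
  | 0, _ => false                        -- unreachable when started with length+1 steps
  | f + 1, l =>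
    let j := PySem.Chars.find l ['#']
    if j = -1 then true
    else
      match PySem.Int.ofChars? (l.take j.toNat) with
      | none => false
      | some n => (decide (0 ≤ n)) && preAuxF f (l.drop (j.toNat + 1 + n.toNat))

def Pre_decode (encoded_string : String) : Prop :=
  preAuxF (encoded_string.toList.length + 1) encoded_string.toList = true
instance (encoded_string : String) : Decidable (Pre_decode encoded_string) := by unfold Pre_decode; infer_instance

def pvWitness_decode : String := "4#word"

def Spec_decode (encoded_string : String) (out : List String) : Prop := out = decode_alt encoded_string
instance (encoded_string : String) (out : List String) : Decidable (Spec_decode encoded_string out) := by unfold Spec_decode; infer_instance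

-- ===== CLAIM (what is proved, stated in full; the proofs are below) =====
def Claim_equal_decode : Prop := ∀ (encoded_string : String), Dom_decode encoded_string → Pre_decode encoded_string → Spec_decode encoded_string (decode encoded_string)

-- ===== LEMMAS AND PROOFS =====

theorem singleton_prefix_iff {α : Type} (c : α) (l : List α) : [c] <+: l ↔ l.head? = some c := by
  cases l with
  | nil => simp
  | cons a t =>
    constructor
    · rintro ⟨r, hr⟩; simp at hr; simp [hr.1]
    · intro hh; simp at hh; exact ⟨t, by simp [hh]⟩

theorem prefix_drop_iff (c : Char) (l : List Char) (m : Nat) : [c] <+: l.drop m ↔ l[m]? = some c := by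
  rw [singleton_prefix_iff, List.head?_drop]

theorem find_char_neg (l : List Char) (c : Char)
    (h : ∀ m : Nat, (hm : m < l.length) → l[m] ≠ c) :
    PySem.Chars.find l [c] = -1 := by
  rw [PySem.Chars.find_eq_neg_one_iff, List.singleton_infix_iff]
  intro hmem
  obtain ⟨m, hm, he⟩ := List.getElem_of_mem hmem
  exact h m hm he

theorem find_char_eq (l : List Char) (c : Char) (k : Nat) (hk : k < l.length)
    (hc : l[k] = c) (hmin : ∀ m : Nat, m < k → (hm : m < l.length) → l[m] ≠ c) :
    PySem.Chars.find l [c] = (k : Int) := by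
  have hinf : [c] <:+: l := (List.singleton_infix_iff c l).mpr (hc ▸ List.getElem_mem hk)
  have hnn : 0 ≤ PySem.Chars.find l [c] := (PySem.Chars.find_nonneg_iff l [c]).mpr hinf
  obtain ⟨hpre, hminf⟩ := PySem.Chars.find_spec hnn
  set f := (PySem.Chars.find l [c]).toNat with hf
  have hfl : l[f]? = some c := (prefix_drop_iff c l f).mp hpre
  have hflt : f < l.length := by
    by_contra hge
    rw [List.getElem?_eq_none (by omega)] at hfl; simp at hfl
  have hfc : l[f] = c := by
    rw [List.getElem?_eq_getElem hflt] at hfl; injection hfl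
  have h1 : ¬ k < f := fun hlt =>
    hminf k hlt ((prefix_drop_iff c l k).mpr (by rw [List.getElem?_eq_getElem hk, hc]))
  have h2 : ¬ f < k := fun hlt => hmin f hlt hflt hfc
  omega

theorem find_hash_pos (l : List Char) (h : PySem.Chars.find l ['#'] ≠ -1) :
    0 ≤ PySem.Chars.find l ['#'] ∧ l ≠ [] := by
  have h1 := PySem.Chars.neg_one_le_find l ['#']
  refine ⟨by omega, ?_⟩
  intro hnil
  rw [hnil] at h
  exact h (by decide)

theorem preAuxF_irrel (f : Nat) : ∀ (f' : Nat) (l : List Char), l.length < f → l.length < f' →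
    preAuxF f l = preAuxF f' l := by
  induction f with
  | zero => intro f' l h; omega
  | succ f ih =>
    intro f' l hf hf'
    cases f' with
    | zero => omega
    | succ f'' =>
      simp only [preAuxF]
      split
      · rfl
      · next hj =>
        split
        · rfl
        · next n hn =>
          have hpos := (find_hash_pos l hj).1
          have hlen : 0 < l.length := List.length_pos_iff.mpr (find_hash_pos l hj).2
          congr 1
          apply ih
          · simp [List.length_drop]; omega
          · simp [List.length_drop]; omega

def specFn : List Char → List String
  | l =>
    let j := PySem.Chars.find l ['#']
    if h : j = -1 then []
    else
      match PySem.Int.ofChars? (l.take j.toNat) with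
      | none => []
      | some n =>
        String.ofList ((l.drop (j.toNat + 1)).take n.toNat) :: specFn (l.drop (j.toNat + 1 + n.toNat))
  termination_by l => l.length
  decreasing_by
    have h0 : (0:Int) ≤ PySem.Chars.find l ['#'] :=
      lt_of_le_of_ne (PySem.Chars.neg_one_le_find l ['#']) (Ne.symm h)
    have hne : l ≠ [] := by
      intro hnil
      rw [hnil] at h0
      revert h0; decide
    have : 0 < l.length := List.length_pos_iff.mpr hne
    simp [List.length_drop]; omega

theorem specFn_nil (l : List Char) (h : ∀ m : Nat, (hm : m < l.length) → l[m] ≠ '#') :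
    specFn l = [] := by
  rw [specFn, find_char_neg l '#' h]
  simp

theorem spec_drop_nil (s : List Char) (p : Nat)
    (h : ∀ t : Nat, p ≤ t → (ht : t < s.length) → s[t] ≠ '#') : specFn (s.drop p) = [] := by
  apply specFn_nil
  intro m hm
  rw [List.getElem_drop]
  exact h (p + m) (by omega) (by simp at hm; omega)

theorem preAuxF_head (f : Nat) (l : List Char) (hne : l ≠ [])
    (h0 : l[0]'(List.length_pos_iff.mpr hne) = '#') : preAuxF f l ≠ true := by
  cases f with
  | zero => simp [preAuxF]
  | succ f =>
    have hfind : PySem.Chars.find l ['#'] = ((0 : Nat) : Int) :=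
      find_char_eq l '#' 0 (List.length_pos_iff.mpr hne) h0 (by omega)
    simp only [preAuxF, hfind]
    norm_num
    rw [show PySem.Int.ofChars? ([] : List Char) = none from by decide]

theorem decodeAltLoop_eq (fuel : Nat) : ∀ (l : List Char) (acc : List String),
    l.length < fuel → preAuxF (l.length + 1) l = true →
    decodeAltLoop fuel l acc = acc ++ specFn l := by
  induction fuel with
  | zero => intro l acc h; omega
  | succ fuel ih =>
    intro l acc hf hp
    rw [specFn]
    simp only [decodeAltLoop, preAuxF] at hp ⊢
    by_cases hj : PySem.Chars.find l ['#'] = -1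
    · simp [hj]
    · obtain ⟨hpos, hne⟩ := find_hash_pos l hj
      have hlen : 0 < l.length := List.length_pos_iff.mpr hne
      have hle := PySem.Chars.find_le_length l ['#']
      simp only [hj, reduceIte] at hp ⊢
      rw [PySem.List.slice_to l hpos]
      have hex : ∃ n, PySem.Int.ofChars? (l.take (PySem.Chars.find l ['#']).toNat) = some n ∧
          0 ≤ n ∧ preAuxF l.length (l.drop ((PySem.Chars.find l ['#']).toNat + 1 + n.toNat)) = true := by
        revert hp
        cases PySem.Int.ofChars? (l.take (PySem.Chars.find l ['#']).toNat) with
        | none => intro hp; simp at hp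
        | some n =>
          intro hp
          simp only [Bool.and_eq_true, decide_eq_true_eq] at hp
          exact ⟨n, rfl, hp⟩
      obtain ⟨n, hoc, hn0, hrec⟩ := hex
      rw [hoc]
      simp only [reduceDIte]
      set j := PySem.Chars.find l ['#'] with hjdef
      have e1 : PySem.List.slice l (some (j + 1 + n)) none = l.drop (j.toNat + 1 + n.toNat) := by
        rw [PySem.List.slice_from l (by omega : (0:Int) ≤ j + 1 + n)]
        have h1 : (j + 1 + n).toNat = j.toNat + 1 + n.toNat := by omega
        rw [h1]
      have e2 : PySem.List.slice l (some (j + 1)) (some (j + 1 + n)) =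
          (l.drop (j.toNat + 1)).take n.toNat := by
        rw [PySem.List.slice_toNat l (by omega : (0:Int) ≤ j + 1) (by omega : (0:Int) ≤ j + 1 + n)]
        have h1 : (j + 1 + n).toNat - (j + 1).toNat = n.toNat := by omega
        have h2 : (j + 1).toNat = j.toNat + 1 := by omega
        rw [h1, h2]
      rw [e1, e2]
      have hdl : (l.drop (j.toNat + 1 + n.toNat)).length < fuel := by
        simp [List.length_drop]; omega
      have hpre' : preAuxF ((l.drop (j.toNat + 1 + n.toNat)).length + 1)
          (l.drop (j.toNat + 1 + n.toNat)) = true := by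
        rw [preAuxF_irrel _ l.length _ (by omega) (by simp [List.length_drop]; omega)]
        exact hrec
      rw [ih _ _ hdl hpre']
      simp

theorem decodeLoop_eq (s : List Char) : ∀ (fuel : Nat) (i p : Nat) (acc : List String),
    p ≤ i →
    (∀ t : Nat, p ≤ t → t < i → (ht : t < s.length) → s[t] ≠ '#') →
    preAuxF ((s.drop p).length + 1) (s.drop p) = true →
    s.length + 1 ≤ fuel + i →
    decodeLoop s fuel (i : Int) (p : Int) acc = acc ++ specFn (s.drop p) := by
  intro fuel
  induction fuel with
  | zero =>
    intro i p acc hpi hsharp hpre hfuel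
    simp only [decodeLoop]
    rw [spec_drop_nil s p (fun t ht1 ht2 => hsharp t ht1 (by omega) ht2)]
    simp
  | succ fuel ih =>
    intro i p acc hpi hsharp hpre hfuel
    simp only [decodeLoop]
    by_cases hi : i < s.length
    · rw [if_pos (by exact_mod_cast hi)]
      rw [PySem.List.pyGet?_natCast, List.getElem?_eq_getElem hi]
      simp only []
      by_cases hc : s[i] = '#'
      · -- delimiter found at i
        rw [if_pos hc]
        -- the first '#' of s.drop p sits at position i - p
        have hlp : p < s.length := by omega
        have hdlen : (s.drop p).length = s.length - p := by simp
        have hfind : PySem.Chars.find (s.drop p) ['#'] = ((i - p : Nat) : Int) := by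
          refine find_char_eq _ '#' (i - p) (by rw [hdlen]; omega) ?_ ?_
          · rw [List.getElem_drop]
            have : p + (i - p) = i := by omega
            simp_rw [this]; exact hc
          · intro m hm hmlt
            rw [List.getElem_drop]
            exact hsharp (p + m) (by omega) (by omega) (by simp at hmlt; omega)
        -- unfold the precondition one step
        have hlen1 : (s.drop p).length = (s.length - p - 1) + 1 := by simp; omega
        rw [specFn, hfind]
        simp only [preAuxF, hfind] at hpre
        have hjne : ¬ ((i - p : Nat) : Int) = -1 := by omega
        rw [dif_neg hjne]
        simp only [hjne, reduceIte] at hpre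
        have htn : (((i - p : Nat) : Int)).toNat = i - p := by omega
        rw [htn] at hpre ⊢
        -- A's length slice is the same list
        have eslice : PySem.List.slice s (some (p : Int)) (some (i : Int)) = (s.drop p).take (i - p) := by
          rw [PySem.List.slice_natCast]
        rw [eslice]
        -- extract the parsed length from the precondition
        have hex : ∃ n : Int, PySem.Int.ofChars? ((s.drop p).take (i - p)) = some n ∧ 0 ≤ n ∧
            preAuxF ((s.drop p).length) ((s.drop p).drop ((i - p) + 1 + n.toNat)) = true := by
          rw [hlen1] at hpre
          revert hpre
          cases PySem.Int.ofChars? ((s.drop p).take (i - p)) with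
          | none => intro hpre; simp at hpre
          | some n =>
            intro hpre
            simp only [Bool.and_eq_true, decide_eq_true_eq] at hpre
            exact ⟨n, rfl, hpre.1, by rw [hlen1]; exact hpre.2⟩
        obtain ⟨n, hoc, hn0, hrec⟩ := hex
        rw [hoc]
        simp only []
        simp only [List.drop_drop] at hrec ⊢
        rw [show p + (i - p + 1) = i + 1 from by omega]
        rw [show p + (i - p + 1 + n.toNat) = i + 1 + n.toNat from by omega] at hrec ⊢
        have ew : PySem.List.slice s (some ((i : Int) + 1)) (some ((i : Int) + 1 + n)) =
            (s.drop (i + 1)).take n.toNat := by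
          rw [PySem.List.slice_toNat s (by omega : (0:Int) ≤ (i:Int) + 1) (by omega : (0:Int) ≤ (i:Int) + 1 + n)]
          rw [show ((i : Int) + 1 + n).toNat - ((i : Int) + 1).toNat = n.toNat from by omega]
          rw [show ((i : Int) + 1).toNat = i + 1 from by omega]
        rw [ew]
        set p' : Nat := i + 1 + n.toNat with hp'def
        have ci : (i : Int) + 1 + n + 1 = ((p' + 1 : Nat) : Int) := by omega
        have cp : (i : Int) + 1 + n = ((p' : Nat) : Int) := by omega
        rw [ci, cp]
        have hrec' : preAuxF ((s.drop p').length + 1) (s.drop p') = true := by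
          rw [preAuxF_irrel _ ((s.drop p).length) _ (by omega) (by simp; omega)]
          rw [hlen1] at hrec ⊢
          exact hrec
        rw [ih (p' + 1) p' (acc ++ [String.ofList ((s.drop (i + 1)).take n.toNat)]) (by omega)
          (by
            intro t ht1 ht2 ht
            have htp : t = p' := by omega
            subst htp
            intro heq
            refine preAuxF_head ((s.drop p').length + 1) (s.drop p')
              (List.ne_nil_of_length_pos (by simp; omega)) ?_ hrec'
            rw [List.getElem_drop]
            simpa using heq)
          hrec' (by omega)]
        simp
      · rw [if_neg hc]
        have ci : (i : Int) + 1 = ((i + 1 : Nat) : Int) := by omega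
        rw [ci]
        apply ih (i + 1) p acc (by omega)
        · intro t ht1 ht2 ht
          by_cases htl : t < i
          · exact hsharp t ht1 htl ht
          · have : t = i := by omega
            subst this; exact hc
        · exact hpre
        · omega
    · rw [if_neg (by exact_mod_cast hi)]
      rw [spec_drop_nil s p (fun t ht1 ht2 => hsharp t ht1 (by omega) ht2)]
      simp

-- ===== VERDICT (by name: the statement is the Claim_ definition above) =====
theorem decode_spec : Claim_equal_decode := by
  intro s _ hpre
  unfold Spec_decode decode decode_alt
  rw [decodeAltLoop_eq (s.toList.length + 1) s.toList [] (by omega) hpre]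
  have h0 : decodeLoop s.toList (s.toList.length + 1) ((0 : Nat) : Int) ((0 : Nat) : Int) [] =
      [] ++ specFn (s.toList.drop 0) :=
    decodeLoop_eq s.toList (s.toList.length + 1) 0 0 [] (le_refl 0)
      (by intro t ht1 ht2; omega) (by simpa using hpre) (by omega)
  simpa using h0
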